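-- pv_equiv track=rewrite | github.com/j-hartenstein/focused-attention-fact | fact/utils.py | _find_subsequence_span
-- ===== SOURCE A (Python) =====
-- from typing import Optional
--
-- def _find_subsequence_span(
--     sequence: list[int],
--     pattern: list[int],
--     prefer_last: bool = False,
-- ) -> Optional[tuple[int, int]]:
--     """Find [start, end) span of pattern in sequence, or None if not found."""
--     if not pattern or len(pattern) > len(sequence):
--         return None
--
--     starts = range(len(sequence) - len(pattern), -1, -1) if prefer_last else range(0, len(sequence) - len(pattern) + 1)
--     for start in starts:
--         if sequence[start:start + len(pattern)] == pattern:
--             return start, start + len(pattern)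
--     return None
-- ===== SOURCE B (Python) =====
-- from typing import Optional
--
-- def _find_subsequence_span(
--     sequence: list[int],
--     pattern: list[int],
--     prefer_last: bool = False,
-- ) -> Optional[tuple[int, int]]:
--     """Single forward pass: compare elements in place at each start (no slice
--     allocation), collect every match start, then pick the first or last."""
--     m = len(pattern)
--     if m == 0 or m > len(sequence):
--         return None
--     matches = [i for i in range(len(sequence) - m + 1)
--                if all(sequence[i + j] == pattern[j] for j in range(m))]
--     if not matches:
--         return None
--     s = matches[-1] if prefer_last else matches[0]
--     return s, s + m
-- ===== Notes on version B (the rewrite author's own statement) =====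
-- stated objective: alternative
-- what changed: B always scans forward once, comparing elements in place instead of building and comparing a slice at every start, collects all match starts and then picks the first or last, whereas A scans in a direction chosen by prefer_last (backwards when true) and early-returns on the first slice match.
import Mathlib
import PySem

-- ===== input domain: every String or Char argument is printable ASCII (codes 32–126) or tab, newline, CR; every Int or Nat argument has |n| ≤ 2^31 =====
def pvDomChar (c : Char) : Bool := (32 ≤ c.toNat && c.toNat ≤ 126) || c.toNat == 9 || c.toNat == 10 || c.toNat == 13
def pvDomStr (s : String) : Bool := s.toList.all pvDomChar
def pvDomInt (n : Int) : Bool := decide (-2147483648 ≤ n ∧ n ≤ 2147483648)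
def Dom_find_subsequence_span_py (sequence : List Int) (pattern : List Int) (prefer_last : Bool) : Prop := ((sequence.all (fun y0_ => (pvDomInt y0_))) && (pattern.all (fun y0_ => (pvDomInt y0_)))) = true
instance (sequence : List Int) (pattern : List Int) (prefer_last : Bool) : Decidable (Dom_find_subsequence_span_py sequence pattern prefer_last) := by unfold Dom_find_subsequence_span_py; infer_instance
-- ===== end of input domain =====

-- B changes the traversal: one forward pass comparing elements in place (no slices),
-- collecting all match starts and picking first/last, instead of A's direction-dependent
-- early-return slice scan; same asymptotic cost (objective: alternative).

-- ===== PORT A =====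
def find_subsequence_span_py (sequence : List Int) (pattern : List Int) (prefer_last : Bool) : Option (Int × Int) :=
  if pattern = [] ∨ (sequence.length : Int) < (pattern.length : Int) then none
  else
    let n : Int := sequence.length
    let m : Int := pattern.length
    let starts : List Int :=
      if prefer_last then PySem.List.pyRange (n - m) (-1) (-1)
      else PySem.List.pyRange 0 (n - m + 1) 1
    match starts.find? (fun start => PySem.List.slice sequence (some start) (some (start + m)) == pattern) with
    | some start => some (start, start + m)
    | none => none

-- ===== PORT B =====
def find_subsequence_span_py_alt (sequence : List Int) (pattern : List Int) (prefer_last : Bool) : Option (Int × Int) :=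
  let m : Int := pattern.length
  if m = 0 ∨ (sequence.length : Int) < m then none
  else
    let ms : List Int :=
      (PySem.List.pyRange 0 ((sequence.length : Int) - m + 1) 1).filter
        (fun i => (PySem.List.pyRange 0 m 1).all
          (fun j => PySem.List.pyGet? sequence (i + j) == PySem.List.pyGet? pattern j))
    match (if prefer_last then ms.getLast? else ms.head?) with
    | some s => some (s, s + m)
    | none => none

-- ===== PRECONDITION & SPEC =====
def Spec_find_subsequence_span_py (sequence : List Int) (pattern : List Int) (prefer_last : Bool) (out : Option (Int × Int)) : Prop := out = find_subsequence_span_py_alt sequence pattern prefer_last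
instance (sequence : List Int) (pattern : List Int) (prefer_last : Bool) (out : Option (Int × Int)) : Decidable (Spec_find_subsequence_span_py sequence pattern prefer_last out) := by unfold Spec_find_subsequence_span_py; infer_instance

-- ===== CLAIM (what is proved, stated in full; the proofs are below) =====
def Claim_equal_find_subsequence_span_py : Prop := ∀ (sequence : List Int) (pattern : List Int) (prefer_last : Bool), Dom_find_subsequence_span_py sequence pattern prefer_last → Spec_find_subsequence_span_py sequence pattern prefer_last (find_subsequence_span_py sequence pattern prefer_last)

-- ===== LEMMAS AND PROOFS =====

-- find? is head? of the filtered list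
theorem pv_find?_eq_head?_filter {α : Type} (p : α → Bool) (l : List α) :
    l.find? p = (l.filter p).head? := by
  induction l with
  | nil => rfl
  | cons a t ih =>
    cases hpa : p a with
    | true => simp [hpa]
    | false =>
      rw [List.find?_cons_of_neg (by simp [hpa]), List.filter_cons_of_neg (by simp [hpa]), ih]

-- find? over the reversed list is getLast? of the filtered list
theorem pv_find?_reverse_eq_getLast?_filter {α : Type} (p : α → Bool) (l : List α) :
    l.reverse.find? p = (l.filter p).getLast? := by
  rw [pv_find?_eq_head?_filter, List.filter_reverse, List.head?_reverse]

-- pointwise equality of an m-window with the pattern ↔ slice equality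
theorem pv_window_eq (sequence pattern : List Int) (a : Nat)
    (hlen : a + pattern.length ≤ sequence.length) :
    ((sequence.drop a).take pattern.length = pattern) ↔
      (∀ j < pattern.length, sequence[a + j]? = pattern[j]?) := by
  constructor
  · intro h j hj
    have := congrArg (fun l => l[j]?) h
    simpa [List.getElem?_take, List.getElem?_drop, hj] using this
  · intro h
    apply List.ext_getElem?
    intro j
    by_cases hj : j < pattern.length
    · simpa [List.getElem?_take, List.getElem?_drop, hj] using h j hj
    · have h1 : ((sequence.drop a).take pattern.length)[j]? = none := by
        simp [hj]
      have h2 : pattern[j]? = none := by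
        simp [Nat.le_of_not_lt hj]
      rw [h1, h2]

-- A's slice predicate agrees with B's pointwise predicate on every admissible start
theorem pv_pred_eq (sequence pattern : List Int) (i : Int)
    (hmem : i ∈ PySem.List.pyRange 0 ((sequence.length : Int) - (pattern.length : Int) + 1) 1) :
    (PySem.List.slice sequence (some i) (some (i + (pattern.length : Int))) == pattern) =
      ((PySem.List.pyRange 0 (pattern.length : Int) 1).all
        (fun j => PySem.List.pyGet? sequence (i + j) == PySem.List.pyGet? pattern j)) := by
  rw [PySem.List.mem_pyRange_one] at hmem
  obtain ⟨h0, hlt⟩ := hmem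
  obtain ⟨a, rfl⟩ : ∃ a : Nat, i = (a : Int) := ⟨i.toNat, (Int.toNat_of_nonneg h0).symm⟩
  have hlen : a + pattern.length ≤ sequence.length := by omega
  rw [Bool.eq_iff_iff, beq_iff_eq, PySem.List.slice_natCast_add,
    pv_window_eq sequence pattern a hlen, PySem.List.pyRange_one, List.all_eq_true]
  simp only [Int.sub_zero, Int.toNat_natCast, List.mem_map, List.mem_range, beq_iff_eq, zero_add]
  constructor
  · rintro h x ⟨j, hj, rfl⟩
    have hc : ((a : Int) + (j : Int)) = ((a + j : Nat) : Int) := by push_cast; ring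
    rw [hc, PySem.List.pyGet?_natCast, PySem.List.pyGet?_natCast]
    exact h j hj
  · intro h j hj
    have := h (j : Int) ⟨j, hj, rfl⟩
    have hc : ((a : Int) + (j : Int)) = ((a + j : Nat) : Int) := by push_cast; ring
    rw [hc, PySem.List.pyGet?_natCast, PySem.List.pyGet?_natCast] at this
    exact this

-- ===== VERDICT (by name: the statement is the Claim_ definition above) =====
theorem find_subsequence_span_py_spec : Claim_equal_find_subsequence_span_py := by
  intro sequence pattern prefer_last _
  unfold Spec_find_subsequence_span_py find_subsequence_span_py find_subsequence_span_py_alt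
  by_cases hg : pattern = [] ∨ (sequence.length : Int) < (pattern.length : Int)
  · have hg' : (pattern.length : Int) = 0 ∨ (sequence.length : Int) < (pattern.length : Int) := by
      rcases hg with h | h
      · left; simp [h]
      · right; exact h
    rw [if_pos hg, if_pos hg']
  · have hg' : ¬((pattern.length : Int) = 0 ∨ (sequence.length : Int) < (pattern.length : Int)) := by
      push_neg at hg ⊢
      refine ⟨?_, hg.2⟩
      intro h
      exact hg.1 (by simpa [List.length_eq_zero_iff] using h)
    rw [if_neg hg, if_neg hg']
    simp only []
    have hrev : PySem.List.pyRange ((sequence.length : Int) - (pattern.length : Int)) (-1) (-1) =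
        (PySem.List.pyRange 0 ((sequence.length : Int) - (pattern.length : Int) + 1) 1).reverse := by
      rw [PySem.List.pyRange_neg_one_eq_reverse]; norm_num
    cases prefer_last with
    | false =>
      simp only [if_neg Bool.false_ne_true]
      rw [pv_find?_eq_head?_filter,
        List.filter_congr (fun i hi => pv_pred_eq sequence pattern i hi)]
    | true =>
      simp only [if_true]
      rw [hrev, pv_find?_reverse_eq_getLast?_filter,
        List.filter_congr (fun i hi => pv_pred_eq sequence pattern i hi)]
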